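-- pv_equiv track=rewrite | github.com/markoelez/vibec | src/vibec/checker.py | get_result_ok_type
-- ===== SOURCE A (Python) =====
-- def is_result_type(type_str: str) -> bool:
--   """Check if type string represents a Result type."""
--   return type_str.startswith("Result[")
--
-- def get_result_ok_type(type_str: str) -> str | None:
--   """Extract Ok type from Result type string like Result[i64,str] -> i64."""
--   if not is_result_type(type_str):
--     return None
--   inner = type_str[7:-1]  # Remove "Result[" and "]"
--   # Find the comma that separates Ok and Err types (handle nested types)
--   depth = 0
--   for i, c in enumerate(inner):
--     if c in "([":
--       depth += 1
--     elif c in ")]":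
--       depth -= 1
--     elif c == "," and depth == 0:
--       return inner[:i]
--   return None
-- ===== SOURCE B (Python) =====
-- def get_result_ok_type(type_str: str) -> str | None:
--   """Extract Ok type from Result type string like Result[i64,str] -> i64."""
--   if not type_str.startswith("Result["):
--     return None
--   inner = type_str[7:-1]
--   parts = inner.split(",")
--   depth = 0
--   for j, part in enumerate(parts):
--     depth += sum(1 for c in part if c in "([") - sum(1 for c in part if c in ")]")
--     if depth == 0 and j != len(parts) - 1:
--       return ",".join(parts[:j + 1])
--   return None
-- ===== Notes on version B (the rewrite author's own statement) =====
-- stated objective: alternative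
-- what changed: Replaces the per-character enumerate scan with a slice back to inner[:i] by splitting inner on the comma separator once and folding over the resulting parts with a running bracket depth, rejoining the accumulated parts at the first top-level comma.
import Mathlib
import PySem

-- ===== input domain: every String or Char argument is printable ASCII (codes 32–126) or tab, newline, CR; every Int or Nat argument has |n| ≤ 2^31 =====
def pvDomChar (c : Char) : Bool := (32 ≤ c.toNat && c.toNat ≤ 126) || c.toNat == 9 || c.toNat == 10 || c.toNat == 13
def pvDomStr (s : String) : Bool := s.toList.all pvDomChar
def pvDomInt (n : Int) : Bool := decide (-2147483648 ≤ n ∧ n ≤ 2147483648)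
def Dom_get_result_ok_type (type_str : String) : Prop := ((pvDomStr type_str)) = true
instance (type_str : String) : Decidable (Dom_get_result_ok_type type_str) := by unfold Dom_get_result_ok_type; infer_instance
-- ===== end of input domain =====

-- B re-implements the Ok-type extraction by splitting inner at commas once and folding the
-- parts with a running bracket depth, instead of A's per-character scan with a slice back.

-- ===== PORT A =====
def is_result_type (type_str : String) : Bool := PySem.Str.startswith type_str "Result["

-- A's for-loop over enumerate(inner): i is the index, depth the running bracket depth.
def pvAFind : List Char → Nat → Int → Option Nat
  | [], _, _ => none
  | c :: rest, i, depth =>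
    if c == '(' || c == '[' then pvAFind rest (i + 1) (depth + 1)
    else if c == ')' || c == ']' then pvAFind rest (i + 1) (depth - 1)
    else if c == ',' && depth == 0 then some i
    else pvAFind rest (i + 1) depth

def get_result_ok_type (type_str : String) : Option String :=
  if ¬ is_result_type type_str then none
  else
    let inner := PySem.Str.slice type_str (some 7) (some (-1))
    match pvAFind inner.toList 0 0 with
    | some i => some (PySem.Str.slice inner none (some (i : Int)))  -- inner[:i]
    | none => none

-- ===== PORT B =====
-- sum(1 for c in part if c in "([") - sum(1 for c in part if c in ")]")
def pvDelta (p : List Char) : Int :=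
  (p.countP (fun c => c == '(' || c == '[') : Int) - (p.countP (fun c => c == ')' || c == ']') : Int)

-- inner.split with the comma separator, on code points (hand port of str.split)
def pvSplitComma : List Char → List (List Char)
  | [] => [[]]
  | c :: r =>
    if c = ',' then [] :: pvSplitComma r
    else
      match pvSplitComma r with
      | p :: ps => (c :: p) :: ps
      | [] => [[c]]

-- joining parts with the comma separator, on code points (hand port of str.join)
def pvJoinComma : List (List Char) → List Char
  | [] => []
  | [p] => p
  | p :: q :: rest => p ++ ',' :: pvJoinComma (q :: rest)

-- B's for-loop over enumerate(parts); acc is parts[:j], 'rest ≠ []' is 'j != len(parts)-1'.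
def pvBLoop : List (List Char) → Int → List (List Char) → Option String
  | [], _, _ => none
  | p :: rest, depth, acc =>
    if depth + pvDelta p = 0 ∧ rest ≠ [] then some (String.ofList (pvJoinComma (acc ++ [p])))
    else pvBLoop rest (depth + pvDelta p) (acc ++ [p])

def get_result_ok_type_alt (type_str : String) : Option String :=
  if ¬ PySem.Str.startswith type_str "Result[" then none
  else
    let inner := PySem.Str.slice type_str (some 7) (some (-1))
    pvBLoop (pvSplitComma inner.toList) 0 []

-- ===== PRECONDITION & SPEC =====
def Spec_get_result_ok_type (type_str : String) (out : Option String) : Prop := out = get_result_ok_type_alt type_str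
instance (type_str : String) (out : Option String) : Decidable (Spec_get_result_ok_type type_str out) := by unfold Spec_get_result_ok_type; infer_instance

-- ===== CLAIM (what is proved, stated in full; the proofs are below) =====
def Claim_equal_get_result_ok_type : Prop := ∀ (type_str : String), Dom_get_result_ok_type type_str → Spec_get_result_ok_type type_str (get_result_ok_type type_str)

-- ===== LEMMAS AND PROOFS =====

-- A's scan, reformulated to return the prefix before the found comma instead of its index.
def pvAPre : List Char → Int → Option (List Char)
  | [], _ => none
  | c :: rest, d =>
    if c == '(' || c == '[' then (pvAPre rest (d + 1)).map (c :: ·)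
    else if c == ')' || c == ']' then (pvAPre rest (d - 1)).map (c :: ·)
    else if c == ',' && d == 0 then some []
    else (pvAPre rest d).map (c :: ·)

lemma pvAFind_eq : ∀ (cs : List Char) (i : Nat) (d : Int),
    pvAFind cs i d = (pvAPre cs d).map (fun p => i + p.length) := by
  intro cs
  induction cs with
  | nil => intro i d; simp [pvAFind, pvAPre]
  | cons c r ih =>
    intro i d
    simp only [pvAFind, pvAPre]
    by_cases h1 : (c == '(' || c == '[') = true
    · simp only [h1, if_true, ih]
      cases pvAPre r (d + 1) <;> simp <;> omega
    · simp only [h1]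
      by_cases h2 : (c == ')' || c == ']') = true
      · simp only [h2, if_true, ih]
        cases pvAPre r (d - 1) <;> simp <;> omega
      · simp only [h2]
        by_cases h3 : (c == ',' && d == 0) = true
        · simp [h3]
        · simp only [h3, ih]
          cases pvAPre r d <;> simp <;> omega

lemma pvAPre_prefix : ∀ (cs : List Char) (d : Int) (p : List Char),
    pvAPre cs d = some p → cs.take p.length = p := by
  intro cs
  induction cs with
  | nil => intro d p h; simp [pvAPre] at h
  | cons c r ih =>
    intro d p h
    simp only [pvAPre] at h
    by_cases h1 : (c == '(' || c == '[') = true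
    · rw [if_pos h1, Option.map_eq_some_iff] at h
      obtain ⟨q, hq, hp⟩ := h
      subst hp
      simpa using ih _ _ hq
    · rw [if_neg h1] at h
      by_cases h2 : (c == ')' || c == ']') = true
      · rw [if_pos h2, Option.map_eq_some_iff] at h
        obtain ⟨q, hq, hp⟩ := h
        subst hp
        simpa using ih _ _ hq
      · rw [if_neg h2] at h
        by_cases h3 : (c == ',' && d == 0) = true
        · rw [if_pos h3, Option.some_inj] at h
          subst h; simp
        · rw [if_neg h3, Option.map_eq_some_iff] at h
          obtain ⟨q, hq, hp⟩ := h
          subst hp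
          simpa using ih _ _ hq

lemma pvDelta_nil : pvDelta [] = 0 := by simp [pvDelta]

lemma pvDelta_cons (c : Char) (p : List Char) :
    pvDelta (c :: p) = pvDelta p
      + ((if (c == '(' || c == '[') = true then (1 : Int) else 0)
        - (if (c == ')' || c == ']') = true then (1 : Int) else 0)) := by
  simp only [pvDelta, List.countP_cons]
  split_ifs <;> push_cast <;> ring

lemma pvAPre_append : ∀ (p cs : List Char) (d : Int), ',' ∉ p →
    pvAPre (p ++ cs) d = (pvAPre cs (d + pvDelta p)).map (p ++ ·) := by
  intro p
  induction p with
  | nil => intro cs d _; simp [pvDelta_nil]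
  | cons c p' ih =>
    intro cs d h
    simp only [List.mem_cons, not_or] at h
    obtain ⟨hne, hnp⟩ := h
    have hcomma : (c == ',') = false := by
      simp only [beq_eq_false_iff_ne]; exact fun hc => hne (hc ▸ rfl)
    simp only [List.cons_append, pvAPre]
    by_cases h1 : (c == '(' || c == '[') = true
    · have hclose : ¬ (c == ')' || c == ']') = true := by
        rcases (by simpa using h1 : c = '(' ∨ c = '[') with rfl | rfl <;> decide
      rw [if_pos h1, ih _ _ hnp, Option.map_map]
      have hd : d + 1 + pvDelta p' = d + pvDelta (c :: p') := by
        rw [pvDelta_cons, if_pos h1, if_neg hclose]; ring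
      rw [hd]
      cases pvAPre cs (d + pvDelta (c :: p')) <;> simp
    · rw [if_neg h1]
      by_cases h2 : (c == ')' || c == ']') = true
      · rw [if_pos h2, ih _ _ hnp, Option.map_map]
        have hd : d - 1 + pvDelta p' = d + pvDelta (c :: p') := by
          rw [pvDelta_cons, if_neg h1, if_pos h2]; ring
        rw [hd]
        cases pvAPre cs (d + pvDelta (c :: p')) <;> simp
      · have h3 : ¬ (c == ',' && d == 0) = true := by simp [hcomma]
        rw [if_neg h2, if_neg h3, ih _ _ hnp, Option.map_map]
        have hd : d + pvDelta p' = d + pvDelta (c :: p') := by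
          rw [pvDelta_cons, if_neg h1, if_neg h2]; ring
        rw [hd]
        cases pvAPre cs (d + pvDelta (c :: p')) <;> simp

lemma pvAPre_nocomma (p : List Char) (d : Int) (h : ',' ∉ p) : pvAPre p d = none := by
  have := pvAPre_append p [] d h
  simpa [pvAPre] using this

lemma pvSplitComma_ne_nil : ∀ cs : List Char, pvSplitComma cs ≠ [] := by
  intro cs
  cases cs with
  | nil => simp [pvSplitComma]
  | cons c r =>
    simp only [pvSplitComma]
    split
    · simp
    · cases h : pvSplitComma r <;> simp

lemma pvSplitComma_nocomma : ∀ (cs p : List Char), p ∈ pvSplitComma cs → ',' ∉ p := by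
  intro cs
  induction cs with
  | nil => intro p hp; simp [pvSplitComma] at hp; simp [hp]
  | cons c r ih =>
    intro p hp
    simp only [pvSplitComma] at hp
    by_cases hc : c = ','
    · simp only [hc, if_true, List.mem_cons] at hp
      rcases hp with rfl | hp
      · simp
      · exact ih _ hp
    · simp only [hc, if_false] at hp
      cases h : pvSplitComma r with
      | nil => exact absurd h (pvSplitComma_ne_nil r)
      | cons q qs =>
        rw [h] at hp
        simp only [List.mem_cons] at hp
        rcases hp with rfl | hp
        · have hq : ',' ∉ q := ih q (by rw [h]; exact List.mem_cons_self)
          simp only [List.mem_cons, not_or]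
          exact ⟨fun hcc => hc hcc.symm, hq⟩
        · exact ih p (by rw [h]; exact List.mem_cons_of_mem _ hp)

lemma pvJoinComma_cons (p : List Char) (rest : List (List Char)) (h : rest ≠ []) :
    pvJoinComma (p :: rest) = p ++ ',' :: pvJoinComma rest := by
  cases rest with
  | nil => exact absurd rfl h
  | cons q qs => simp [pvJoinComma]

lemma pvJoinComma_cons_cons (c : Char) (p : List Char) (ps : List (List Char)) :
    pvJoinComma ((c :: p) :: ps) = c :: pvJoinComma (p :: ps) := by
  cases ps <;> simp [pvJoinComma]

lemma pvJoin_split : ∀ cs : List Char, pvJoinComma (pvSplitComma cs) = cs := by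
  intro cs
  induction cs with
  | nil => simp [pvSplitComma, pvJoinComma]
  | cons c r ih =>
    simp only [pvSplitComma]
    by_cases hc : c = ','
    · rw [if_pos hc, pvJoinComma_cons _ _ (pvSplitComma_ne_nil r), ih, hc]
      simp
    · rw [if_neg hc]
      cases h : pvSplitComma r with
      | nil => exact absurd h (pvSplitComma_ne_nil r)
      | cons q qs =>
        rw [pvJoinComma_cons_cons, ← h, ih]

lemma pvJoinComma_assoc : ∀ (acc : List (List Char)) (p q : List Char),
    pvJoinComma (acc ++ [p ++ ',' :: q]) = pvJoinComma ((acc ++ [p]) ++ [q]) := by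
  intro acc
  induction acc with
  | nil => intro p q; simp [pvJoinComma]
  | cons a acc' ih =>
    intro p q
    have h1 : (acc' ++ [p ++ ',' :: q]) ≠ [] := by simp
    have h2 : ((acc' ++ [p]) ++ [q]) ≠ [] := by simp
    calc pvJoinComma (a :: (acc' ++ [p ++ ',' :: q]))
        = a ++ ',' :: pvJoinComma (acc' ++ [p ++ ',' :: q]) := pvJoinComma_cons _ _ h1
      _ = a ++ ',' :: pvJoinComma ((acc' ++ [p]) ++ [q]) := by rw [ih]
      _ = pvJoinComma (a :: ((acc' ++ [p]) ++ [q])) := (pvJoinComma_cons _ _ h2).symm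

lemma pvBLoop_eq : ∀ (parts : List (List Char)) (d : Int) (acc : List (List Char)),
    parts ≠ [] → (∀ p ∈ parts, ',' ∉ p) →
    pvBLoop parts d acc
      = (pvAPre (pvJoinComma parts) d).map (fun q => String.ofList (pvJoinComma (acc ++ [q]))) := by
  intro parts
  induction parts with
  | nil => intro d acc h _; exact absurd rfl h
  | cons p rest ih =>
    intro d acc _ hnc
    have hp : ',' ∉ p := hnc p List.mem_cons_self
    cases rest with
    | nil =>
      simp only [pvBLoop, pvJoinComma]
      rw [pvAPre_nocomma p d hp]
      simp
    | cons q rs =>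
      have hrest : (q :: rs) ≠ [] := by simp
      rw [pvJoinComma_cons _ _ hrest,
          pvAPre_append p (',' :: pvJoinComma (q :: rs)) d hp]
      by_cases hd : d + pvDelta p = 0
      · have hA : pvAPre (',' :: pvJoinComma (q :: rs)) (d + pvDelta p) = some [] := by
          simp [pvAPre, hd]
        conv_lhs => rw [pvBLoop]
        rw [if_pos ⟨hd, hrest⟩, hA]
        simp
      · have hA : pvAPre (',' :: pvJoinComma (q :: rs)) (d + pvDelta p)
            = (pvAPre (pvJoinComma (q :: rs)) (d + pvDelta p)).map (',' :: ·) := by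
          simp [pvAPre, hd]
        conv_lhs => rw [pvBLoop]
        rw [if_neg (fun hc => hd hc.1), hA,
            ih (d + pvDelta p) (acc ++ [p]) hrest
              (fun r hr => hnc r (List.mem_cons_of_mem _ hr))]
        rw [Option.map_map, Option.map_map]
        cases pvAPre (pvJoinComma (q :: rs)) (d + pvDelta p) with
        | none => simp
        | some r =>
          simp only [Option.map_some, Function.comp]
          rw [pvJoinComma_assoc]

lemma string_eq_of_toList (a b : String) (h : a.toList = b.toList) : a = b := by
  have := congrArg String.ofList h
  simpa using this

-- ===== VERDICT (by name: the statement is the Claim_ definition above) =====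
theorem get_result_ok_type_spec : Claim_equal_get_result_ok_type := by
  intro s _
  unfold Spec_get_result_ok_type get_result_ok_type get_result_ok_type_alt is_result_type
  by_cases hs : PySem.Str.startswith s "Result[" = true
  · rw [if_neg (not_not_intro hs), if_neg (not_not_intro hs)]
    show (match pvAFind (PySem.Str.slice s (some 7) (some (-1))).toList 0 0 with
        | some i => some (PySem.Str.slice (PySem.Str.slice s (some 7) (some (-1))) none (some (i : Int)))
        | none => none)
      = pvBLoop (pvSplitComma (PySem.Str.slice s (some 7) (some (-1))).toList) 0 []
    rw [pvBLoop_eq (pvSplitComma (PySem.Str.slice s (some 7) (some (-1))).toList) 0 []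
        (pvSplitComma_ne_nil _) (fun p hp => pvSplitComma_nocomma _ _ hp), pvJoin_split]
    rw [pvAFind_eq]
    cases h : pvAPre (PySem.Str.slice s (some 7) (some (-1))).toList 0 with
    | none => simp
    | some p =>
      simp only [Option.map_some, List.nil_append]
      congr 1
      apply string_eq_of_toList
      have hpfx := pvAPre_prefix _ _ _ h
      have hj : pvJoinComma [p] = p := by simp [pvJoinComma]
      rw [hj]
      simp only [Nat.zero_add]
      rw [PySem.Str.toList_slice, PySem.Chars.slice_eq_listSlice, PySem.List.slice_to_natCast]
      simpa using hpfx
  · rw [if_pos hs, if_pos hs]
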